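-- pv_equiv track=rewrite | github.com/cosmology-man/UNEZ | auto_ez_prototype.py | adjust_column_names
-- ===== SOURCE A (Python) =====
-- def adjust_column_names(names):
--     """
--     Adjusts element name strings by appending a counter to duplicates.
--
--     Parameters:
--     names (list of str): The list of column names.
--
--     Returns:
--     list of str: The adjusted column names.
--     """
--
--     counts = {}
--     new_names = []
--     for name in names:
--         if name in counts:
--             counts[name] += 1
--             new_name = f"{name}.{counts[name]}"
--         else:
--             counts[name] = 0
--             new_name = name
--         new_names.append(new_name)
--     return new_names
-- ===== SOURCE B (Python) =====
-- def adjust_column_names(names):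
--     positions = {}
--     for i, name in enumerate(names):
--         positions.setdefault(name, []).append(i)
--     out = [""] * len(names)
--     for name, idxs in positions.items():
--         for j, i in enumerate(idxs):
--             out[i] = name if j == 0 else f"{name}.{j}"
--     return out
-- ===== Notes on version B (the rewrite author's own statement) =====
-- stated objective: alternative
-- what changed: Instead of a single pass with a running-count dict, B first groups the index positions of each name in one scan, pre-allocates the result list, and then writes the original name / suffixed names into the result by index, group by group.
import Mathlib
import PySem

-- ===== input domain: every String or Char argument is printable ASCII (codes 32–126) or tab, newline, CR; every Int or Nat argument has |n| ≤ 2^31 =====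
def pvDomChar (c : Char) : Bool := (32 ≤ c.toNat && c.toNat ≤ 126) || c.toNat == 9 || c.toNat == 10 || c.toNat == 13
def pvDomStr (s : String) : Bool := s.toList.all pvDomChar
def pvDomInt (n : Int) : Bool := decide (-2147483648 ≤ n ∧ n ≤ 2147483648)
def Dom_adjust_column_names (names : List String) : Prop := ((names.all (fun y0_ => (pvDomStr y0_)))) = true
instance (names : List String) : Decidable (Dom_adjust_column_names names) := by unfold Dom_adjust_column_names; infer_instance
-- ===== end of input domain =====

-- B replaces A's single running-count-dict pass by grouping each name's index positions first
-- and then filling a pre-allocated result list by index (alternative decomposition, same cost).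

-- ===== PORT A =====
-- literal port of A: fold over names carrying (counts dict, accumulated output);
-- counts[name] += 1 is modify with default 0 (the key is present on that branch),
-- and the f-string reads counts[name] back, i.e. getD after the increment.
def adjust_column_names (names : List String) : List String :=
  (names.foldl
    (fun (st : PySem.Dict String Int × List String) name =>
      if st.1.contains name then
        let counts := st.1.modify name 0 (· + 1)
        (counts, st.2 ++ [name ++ "." ++ PySem.Int.toStr (counts.getD name 0)])
      else
        (st.1.insert name 0, st.2 ++ [name]))
    (PySem.Dict.empty, [])).2

-- ===== PORT B =====
-- literal port of B: positions.setdefault(name, []).append(i) is modify name [] (· ++ [i]);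
-- out = [""] * len(names) is List.replicate; out[i] = … is List.set (indices come from enumerate, hence ≥ 0).
def adjust_column_names_alt (names : List String) : List String :=
  let positions : PySem.Dict String (List Int) :=
    (PySem.List.enumerate names).foldl
      (fun d p => d.modify p.2 [] (fun l => l ++ [p.1])) PySem.Dict.empty
  positions.items.foldl
    (fun out q =>
      (PySem.List.enumerate q.2).foldl
        (fun out r =>
          out.set r.2.toNat
            (if r.1 == 0 then q.1 else q.1 ++ "." ++ PySem.Int.toStr r.1))
        out)
    (List.replicate names.length "")

-- ===== PRECONDITION & SPEC =====
def Spec_adjust_column_names (names : List String) (out : List String) : Prop := out = adjust_column_names_alt names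
instance (names : List String) (out : List String) : Decidable (Spec_adjust_column_names names out) := by unfold Spec_adjust_column_names; infer_instance

-- ===== CLAIM (what is proved, stated in full; the proofs are below) =====
def Claim_equal_adjust_column_names : Prop := ∀ (names : List String), Dom_adjust_column_names names → Spec_adjust_column_names names (adjust_column_names names)

-- ===== LEMMAS AND PROOFS =====

-- the common specification: the i-th output is names[i], suffixed with the count of
-- earlier occurrences when that count is nonzero
def sfx (pre : List String) (x : String) : String :=
  if pre.count x = 0 then x else x ++ "." ++ PySem.Int.toStr (pre.count x : Int)

def specGo : List String → List String → List String
  | _, [] => []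
  | pre, x :: xs => sfx pre x :: specGo (pre ++ [x]) xs

theorem specGo_append (l pre : List String) (x : String) :
    specGo pre (l ++ [x]) = specGo pre l ++ [sfx (pre ++ l) x] := by
  induction l generalizing pre with
  | nil => simp [specGo]
  | cons y ys ih => simp [specGo, ih, List.append_assoc]

-- ===== A-side =====
theorem A_loop (rest pre : List String) (d : PySem.Dict String Int) (acc : List String)
    (hc : ∀ y, d.contains y = decide (y ∈ pre))
    (hg : ∀ y ∈ pre, d.getD y 0 = (pre.count y : Int) - 1) :
    (rest.foldl
      (fun (st : PySem.Dict String Int × List String) name =>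
        if st.1.contains name then
          let counts := st.1.modify name 0 (· + 1)
          (counts, st.2 ++ [name ++ "." ++ PySem.Int.toStr (counts.getD name 0)])
        else
          (st.1.insert name 0, st.2 ++ [name]))
      (d, acc)).2 = acc ++ specGo pre rest := by
  induction rest generalizing pre d acc with
  | nil => simp [specGo]
  | cons x xs ih =>
    simp only [List.foldl_cons]
    by_cases hx : x ∈ pre
    · have hcx : d.contains x = true := by rw [hc]; simpa using hx
      rw [if_pos hcx]
      have hcount : 0 < pre.count x := List.count_pos_iff.mpr hx
      have hgd : (d.modify x 0 (· + 1)).getD x 0 = (pre.count x : Int) := by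
        rw [PySem.Dict.getD_modify_self, hg x hx]; ring
      rw [ih (pre ++ [x])]
      · simp only [specGo, sfx, hgd]
        rw [if_neg (by omega)]
        simp
      · intro y
        rw [PySem.Dict.contains_modify, hc]
        by_cases hyx : y = x <;> simp [hyx, hx]
      · intro y hy
        rw [PySem.Dict.getD_modify]
        by_cases hyx : y = x
        · subst hyx
          rw [if_pos rfl, hg y hx]
          simp only [List.count_append, List.count_nil, List.count_cons,
            BEq.rfl, if_true, Nat.cast_add, Nat.cast_one]
          ring
        · rw [if_neg hyx, hg y (by simpa [hyx] using hy)]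
          have hxy : ¬ x = y := fun h => hyx h.symm
          simp [List.count_append, hxy]
    · have hcx : d.contains x = false := by rw [hc]; simpa using hx
      rw [if_neg (by simp [hcx])]
      rw [ih (pre ++ [x])]
      · have h0 : pre.count x = 0 := List.count_eq_zero.mpr hx
        simp [specGo, sfx, h0]
      · intro y
        rw [PySem.Dict.contains_insert, hc]
        by_cases hyx : y = x <;> simp [hyx]
      · intro y hy
        rw [PySem.Dict.getD_insert]
        by_cases hyx : y = x
        · subst hyx
          rw [if_pos rfl]
          have h0 : pre.count y = 0 := List.count_eq_zero.mpr hx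
          simp [List.count_append, h0]
        · rw [if_neg hyx, hg y (by simpa [hyx] using hy)]
          have hxy : ¬ x = y := fun h => hyx h.symm
          simp [List.count_append, hxy]

theorem A_eq_spec (names : List String) : adjust_column_names names = specGo [] names := by
  unfold adjust_column_names
  rw [A_loop names [] PySem.Dict.empty []]
  · simp
  · intro y; simp
  · intro y hy; simp at hy

-- ===== B-side =====
def writeGroup (out : List String) (q : String × List Int) : List String :=
  (PySem.List.enumerate q.2).foldl
    (fun out r =>
      out.set r.2.toNat
        (if r.1 == 0 then q.1 else q.1 ++ "." ++ PySem.Int.toStr r.1))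
    out

def writeAll (items : List (String × List Int)) (out : List String) : List String :=
  items.foldl writeGroup out

def posDict (names : List String) : PySem.Dict String (List Int) :=
  (PySem.List.enumerate names).foldl
    (fun d p => d.modify p.2 [] (fun l => l ++ [p.1])) PySem.Dict.empty

theorem alt_eq (names : List String) :
    adjust_column_names_alt names = writeAll (posDict names).items (List.replicate names.length "") := rfl

theorem length_writeGroup (out : List String) (q : String × List Int) :
    (writeGroup out q).length = out.length := by
  unfold writeGroup
  induction PySem.List.enumerate q.2 generalizing out with
  | nil => rfl
  | cons r rs ih => rw [List.foldl_cons, ih, List.length_set]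

theorem length_writeAll (items : List (String × List Int)) (out : List String) :
    (writeAll items out).length = out.length := by
  unfold writeAll
  induction items generalizing out with
  | nil => rfl
  | cons q qs ih => simp [ih, length_writeGroup]

theorem keys_posDict (names : List String) : (posDict names).keys = PySem.Set.ofList names := by
  unfold posDict
  rw [PySem.Dict.keys_foldl_modify_key (PySem.List.enumerate names) (fun p => p.2) []
        (fun _ p => (fun l => l ++ [p.1]))]
  rw [PySem.List.map_snd_enumerate]
  simp [PySem.Set.update_nil_left]

theorem nodup_keys_posDict (names : List String) : (posDict names).keys.Nodup := by
  unfold posDict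
  exact PySem.Dict.nodup_keys_foldl_modify_key (PySem.List.enumerate names) (fun p => p.2) []
    (fun _ p => (fun l => l ++ [p.1])) PySem.Dict.empty (by simp)

theorem getD_posDict (names : List String) (n : String) :
    (posDict names).getD n [] =
      ((PySem.List.enumerate names).filter (fun p => p.2 == n)).map (fun p => p.1) := by
  have h : posDict names =
      ((PySem.List.enumerate names).map Prod.swap).foldl
        (fun d p => d.modify p.1 [] (fun l => l ++ [p.2])) PySem.Dict.empty := by
    unfold posDict
    rw [List.foldl_map]
    simp only [Prod.fst_swap, Prod.snd_swap]
  rw [h, PySem.Dict.getD_foldl_modify_append]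
  simp [List.filter_map, List.map_map, Function.comp_def, Prod.swap]

theorem mem_getD_posDict (names : List String) (n : String) (i : Int)
    (h : i ∈ (posDict names).getD n []) : 0 ≤ i ∧ i.toNat < names.length := by
  rw [getD_posDict] at h
  simp only [List.mem_map, List.mem_filter] at h
  obtain ⟨p, ⟨hp, -⟩, rfl⟩ := h
  rw [PySem.List.mem_enumerate_iff] at hp
  obtain ⟨k, hk, rfl⟩ := hp
  simp; omega

theorem length_getD_posDict (names : List String) (n : String) :
    ((posDict names).getD n []).length = names.count n := by
  rw [getD_posDict, List.length_map, ← List.countP_eq_length_filter]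
  conv_rhs => rw [← PySem.List.map_snd_enumerate names 0]
  rw [List.count_eq_countP, List.countP_map]
  rfl

theorem mem_items_posDict (names : List String) (q : String × List Int)
    (h : q ∈ (posDict names).items) : q.2 = (posDict names).getD q.1 [] := by
  obtain ⟨k, v⟩ := q
  exact (PySem.Dict.getD_of_mem_items (posDict names) h (nodup_keys_posDict names) []).symm

-- writes of a group stay in range: appending to the output beyond all write indices commutes
theorem writeGroup_append (out ys : List String) (q : String × List Int)
    (hb : ∀ i ∈ q.2, i.toNat < out.length) :
    writeGroup (out ++ ys) q = writeGroup out q ++ ys := by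
  obtain ⟨x, L⟩ := q
  unfold writeGroup
  induction L using List.reverseRecOn generalizing out with
  | nil => rfl
  | append_singleton L i ih =>
    rw [PySem.List.enumerate_append]
    simp only [List.foldl_append]
    rw [ih out (fun j hj => hb j (by simp [hj]))]
    have hlen : (List.foldl (fun out r => out.set r.2.toNat
        (if (r.1 == 0) = true then x else x ++ "." ++ PySem.Int.toStr r.1)) out
        (PySem.List.enumerate L 0)).length = out.length := length_writeGroup out (x, L)
    simp only [PySem.List.enumerate, List.foldl_cons, List.foldl_nil]
    rw [List.set_append, if_pos (by rw [hlen]; exact hb i (by simp))]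

theorem writeAll_append (items : List (String × List Int)) (out ys : List String)
    (hb : ∀ q ∈ items, ∀ i ∈ q.2, i.toNat < out.length) :
    writeAll items (out ++ ys) = writeAll items out ++ ys := by
  induction items generalizing out with
  | nil => rfl
  | cons q qs ih =>
    unfold writeAll
    simp only [List.foldl_cons]
    rw [writeGroup_append out ys q (hb q (by simp))]
    exact ih (writeGroup out q)
      (fun p hp i hi => by rw [length_writeGroup]; exact hb p (by simp [hp]) i hi)

-- a set at an index no group writes to commutes with the whole write phase
theorem writeGroup_set (out : List String) (q : String × List Int) (j : Nat) (v : String)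
    (hb : ∀ i ∈ q.2, i.toNat ≠ j) :
    writeGroup (out.set j v) q = (writeGroup out q).set j v := by
  obtain ⟨x, L⟩ := q
  unfold writeGroup
  induction L using List.reverseRecOn generalizing out with
  | nil => rfl
  | append_singleton L i ih =>
    rw [PySem.List.enumerate_append]
    simp only [List.foldl_append]
    rw [ih out (fun k hk => hb k (by simp [hk]))]
    simp only [PySem.List.enumerate, List.foldl_cons, List.foldl_nil]
    rw [List.set_comm _ _ (Ne.symm (hb i (by simp)))]

theorem writeAll_set (items : List (String × List Int)) (out : List String) (j : Nat) (v : String)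
    (hb : ∀ q ∈ items, ∀ i ∈ q.2, i.toNat ≠ j) :
    writeAll items (out.set j v) = (writeAll items out).set j v := by
  induction items generalizing out with
  | nil => rfl
  | cons q qs ih =>
    unfold writeAll
    simp only [List.foldl_cons]
    rw [writeGroup_set out q j v (hb q (by simp))]
    exact ih (writeGroup out q) (fun p hp i hi => hb p (by simp [hp]) i hi)

theorem writeGroup_snoc (out : List String) (x : String) (L : List Int) (i : Int) :
    writeGroup out (x, L ++ [i]) =
      (writeGroup out (x, L)).set i.toNat
        (if (L.length : Int) == 0 then x else x ++ "." ++ PySem.Int.toStr (L.length : Int)) := by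
  unfold writeGroup
  rw [PySem.List.enumerate_append]
  simp only [List.foldl_append, PySem.List.enumerate, List.foldl_cons, List.foldl_nil]
  norm_num

-- replacing the (unique) entry of key x by its snoc-extended group = write everything, then one extra set
theorem writeAll_update (items : List (String × List Int)) (out : List String)
    (x : String) (L : List Int) (i : Int)
    (hnd : (items.map (fun p => p.1)).Nodup)
    (hx : x ∈ items.map (fun p => p.1))
    (hL : ∀ q ∈ items, q.1 = x → q.2 = L)
    (hb : ∀ q ∈ items, ∀ k ∈ q.2, k.toNat ≠ i.toNat) :
    writeAll (items.map (fun p => if p.1 == x then (x, L ++ [i]) else p)) out =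
      (writeAll items out).set i.toNat
        (if (L.length : Int) == 0 then x else x ++ "." ++ PySem.Int.toStr (L.length : Int)) := by
  induction items generalizing out with
  | nil => simp at hx
  | cons p rest ih =>
    unfold writeAll
    simp only [List.map_cons, List.foldl_cons]
    by_cases hp : p.1 = x
    · have hrest : ∀ q ∈ rest, q.1 ≠ x := by
        intro q hq hqx
        simp only [List.map_cons, List.nodup_cons] at hnd
        exact hnd.1 (hp ▸ hqx ▸ List.mem_map_of_mem hq)
      have hmaprest : rest.map (fun p => if p.1 == x then (x, L ++ [i]) else p) = rest := by
        apply List.map_congr_left ?_ |>.trans (List.map_id rest)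
        intro q hq; simp [hrest q hq]
      have hpL : p = (x, L) := by
        have := hL p (by simp) hp
        exact Prod.ext hp this
      rw [if_pos (by simp [hp]), hmaprest, hpL, writeGroup_snoc]
      exact writeAll_set rest _ i.toNat _ (fun q hq k hk => hb q (by simp [hq]) k hk)
    · rw [if_neg (by simp [hp])]
      refine ih (writeGroup out p) ?_ ?_ ?_ ?_
      · simp only [List.map_cons, List.nodup_cons] at hnd; exact hnd.2
      · simp only [List.map_cons, List.mem_cons] at hx
        rcases hx with h | h
        · exact absurd h.symm (by simpa using hp)
        · exact h
      · exact fun q hq => hL q (by simp [hq])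
      · exact fun q hq => hb q (by simp [hq])

theorem keysMapFst (names : List String) :
    ((posDict names).items.map (fun p => p.1)) = (posDict names).keys := rfl

theorem itemsBound (names : List String) :
    ∀ q ∈ (posDict names).items, ∀ i ∈ q.2, i.toNat < names.length := by
  intro q hq i hi
  rw [mem_items_posDict names q hq] at hi
  exact (mem_getD_posDict names q.1 i hi).2

theorem B_eq_spec (names : List String) : adjust_column_names_alt names = specGo [] names := by
  induction names using List.reverseRecOn with
  | nil => rfl
  | append_singleton l x ih =>
    rw [alt_eq] at ih ⊢
    have hpos : posDict (l ++ [x]) =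
        (posDict l).insert x ((posDict l).getD x [] ++ [(l.length : Int)]) := by
      unfold posDict
      rw [PySem.List.enumerate_append]
      rw [List.foldl_append]
      simp only [PySem.List.enumerate, List.foldl_cons, List.foldl_nil, PySem.Dict.modify]
      norm_num
    have hrep : List.replicate (l ++ [x]).length "" = List.replicate l.length "" ++ [""] := by
      simp [List.replicate_succ']
    have hbound : ∀ q ∈ (posDict l).items, ∀ i ∈ q.2, i.toNat < (List.replicate l.length "").length := by
      simpa using itemsBound l
    have hsetend : ∀ v : String,
        (writeAll (posDict l).items (List.replicate l.length "") ++ [""]).set l.length v =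
          specGo [] l ++ [v] := by
      intro v
      rw [List.set_append, if_neg (by rw [length_writeAll, List.length_replicate]; omega)]
      have h2 : l.length - (writeAll (posDict l).items (List.replicate l.length "")).length = 0 := by
        rw [length_writeAll, List.length_replicate]; omega
      rw [h2, ih]
      rfl
    by_cases hcx : (posDict l).contains x = true
    · have hxl : x ∈ l := by
        have := (PySem.Dict.contains_iff_mem_keys (posDict l) x).mp hcx
        rwa [keys_posDict, PySem.Set.mem_ofList] at this
      have hcnt : 0 < l.count x := List.count_pos_iff.mpr hxl
      have hLlen : ((posDict l).getD x []).length = l.count x := length_getD_posDict l x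
      rw [hpos, hrep, PySem.Dict.items_insert_of_contains (posDict l) _ hcx]
      rw [writeAll_update (posDict l).items _ x ((posDict l).getD x []) (l.length : Int)
            (by rw [keysMapFst]; exact nodup_keys_posDict l)
            (by rw [keysMapFst]; exact (PySem.Dict.contains_iff_mem_keys (posDict l) x).mp hcx)
            (fun q hq hqx => by rw [mem_items_posDict l q hq, hqx])
            (fun q hq k hk => by
              have := itemsBound l q hq k hk
              simp only [Int.toNat_natCast]; omega)]
      rw [writeAll_append (posDict l).items _ _ hbound, Int.toNat_natCast, hsetend]
      rw [specGo_append]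
      congr 2
      simp only [List.nil_append]
      rw [hLlen]
      unfold sfx
      have h0 : l.count x ≠ 0 := by omega
      simp [h0]
    · have hcf : (posDict l).contains x = false := by simpa using hcx
      have hxl : x ∉ l := by
        intro hmem
        have ht : (posDict l).contains x = true := by
          rw [PySem.Dict.contains_iff_mem_keys, keys_posDict]
          exact (PySem.Set.mem_ofList l x).mpr hmem
        rw [hcf] at ht
        cases ht
      have hL0 : (posDict l).getD x [] = [] :=
        PySem.Dict.getD_of_not_contains (posDict l) [] hcf
      rw [hpos, hrep, PySem.Dict.items_insert_of_not_contains (posDict l) _ hcf, hL0]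
      unfold writeAll
      rw [List.foldl_append]
      have h1 : List.foldl writeGroup (List.replicate l.length "" ++ [""]) (posDict l).items =
          writeAll (posDict l).items (List.replicate l.length "") ++ [""] :=
        writeAll_append (posDict l).items _ _ hbound
      rw [h1]
      simp only [List.foldl_cons, List.foldl_nil]
      unfold writeGroup
      simp only [List.nil_append, PySem.List.enumerate, List.foldl_cons, List.foldl_nil]
      rw [Int.toNat_natCast, hsetend]
      rw [specGo_append]
      congr 2
      simp only [List.nil_append]
      unfold sfx
      simp [List.count_eq_zero.mpr hxl]

-- ===== VERDICT (by name: the statement is the Claim_ definition above) =====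
theorem adjust_column_names_spec : Claim_equal_adjust_column_names := by
  intro names _
  unfold Spec_adjust_column_names
  rw [A_eq_spec, B_eq_spec]
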